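-- pv_equiv track=rewrite | github.com/hamedbehzadi/Interpreting-Convolutional-Neural-Networks-by-Explaining-Their-Predictions | vebi comparison/vgg/vebi_3.py | size_conversion
-- ===== SOURCE A (Python) =====
-- def size_conversion(filter):
--     for i in range(3):
--         if filter < 64:
--             return f"cnn_{i + 1}", filter
--         filter -= 64
--
--     for i in range(3):
--         if filter < 128:
--             return f"cnn_{i + 1 + 3}", filter
--         filter -= 128
--
--     for i in range(4):
--         if filter < 256:
--             return f"cnn_{i + 1 + 3 + 3}", filter
--         filter -= 256
--
--     for i in range(8):
--         if filter < 512: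
--             return f"cnn_{i + 1 + 3 + 3 + 4}", filter
--         filter -= 512
--
--     raise ValueError("Invalid filter ID")
-- ===== SOURCE B (Python) =====
-- # B: precomputed cumulative layer-start table + binary search (bisect_right by hand),
-- # instead of A's sequential subtraction cascades.
-- _STARTS = [0, 64, 128, 192, 320, 448, 576, 832, 1088, 1344,
--            1600, 2112, 2624, 3136, 3648, 4160, 4672, 5184]
--
-- def size_conversion(filter):
--     if filter >= 5696:
--         raise ValueError("Invalid filter ID")
--     lo, hi = 0, len(_STARTS)
--     while lo < hi:
--         mid = (lo + hi) // 2
--         if _STARTS[mid] <= filter: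
--             lo = mid + 1
--         else:
--             hi = mid
--     layer = max(lo, 1)
--     return f"cnn_{layer}", filter - _STARTS[layer - 1]
-- ===== Notes on version B (the rewrite author's own statement) =====
-- stated objective: alternative
-- what changed: Replaces A's four subtraction-loop cascades with a precomputed cumulative layer-start table and a hand-written bisect_right binary search; the layer is the insertion point and the offset is filter minus the layer's start.
-- outside the precondition, e.g. on size_conversion(5696): A raises ValueError, B raises ValueError
import Mathlib
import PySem

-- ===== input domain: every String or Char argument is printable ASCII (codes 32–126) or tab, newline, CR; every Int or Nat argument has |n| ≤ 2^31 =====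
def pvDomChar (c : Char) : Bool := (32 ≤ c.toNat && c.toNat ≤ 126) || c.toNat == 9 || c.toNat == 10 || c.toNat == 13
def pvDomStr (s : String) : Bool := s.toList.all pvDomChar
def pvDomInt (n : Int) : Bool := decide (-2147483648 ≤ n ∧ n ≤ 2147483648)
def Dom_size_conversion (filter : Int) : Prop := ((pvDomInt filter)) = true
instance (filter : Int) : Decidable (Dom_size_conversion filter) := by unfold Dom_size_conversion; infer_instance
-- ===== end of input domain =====

-- B replaces A's four sequential subtraction-loop cascades with a precomputed cumulative
-- layer-start table searched by a hand-written bisect_right binary search (objective: alternative).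
-- Both raise ValueError for filter ≥ 5696; Pre_ excludes exactly those inputs.

-- ===== PORT A =====
-- one of A's `for i in range(n): if filter < size: return (..., filter); filter -= size` loops;
-- returns the early-return value, or none with the decremented filter if the loop falls through
def pvLoopA : List Int → Int → Int → Int → Option (String × Int) × Int
  | [], _, _, f => (none, f)
  | i :: rest, off, size, f =>
      if f < size then (some ("cnn_" ++ PySem.Int.toStr (i + 1 + off), f), f)
      else pvLoopA rest off size (f - size)

def size_conversion (filter : Int) : String × Int :=
  match pvLoopA (PySem.List.pyRange 0 3 1) 0 64 filter with
  | (some r, _) => r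
  | (none, f1) =>
    match pvLoopA (PySem.List.pyRange 0 3 1) 3 128 f1 with
    | (some r, _) => r
    | (none, f2) =>
      match pvLoopA (PySem.List.pyRange 0 4 1) 6 256 f2 with
      | (some r, _) => r
      | (none, f3) =>
        match pvLoopA (PySem.List.pyRange 0 8 1) 10 512 f3 with
        | (some r, _) => r
        | (none, _) => ("", 0)  -- unreachable under Pre_: Python raises ValueError here

-- ===== PORT B =====
-- the cumulative layer-start table _STARTS of Source B
def pvStarts : List Int :=
  [0, 64, 128, 192, 320, 448, 576, 832, 1088, 1344,
   1600, 2112, 2624, 3136, 3648, 4160, 4672, 5184]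

-- Source B's `while lo < hi` bisect_right loop, step for step
def pvBisect (x : Int) (lo hi : Nat) : Nat :=
  if lo < hi then
    let mid := (lo + hi) / 2
    if pvStarts.getD mid 0 ≤ x then pvBisect x (mid + 1) hi else pvBisect x lo mid
  else lo
termination_by hi - lo
decreasing_by all_goals omega

def size_conversion_alt (filter : Int) : String × Int :=
  -- Source B raises ValueError when filter ≥ 5696; unreachable under Pre_
  if filter ≥ 5696 then ("", 0)
  else
    let lo := pvBisect filter 0 18
    let layer := max lo 1
    ("cnn_" ++ PySem.Int.toStr (Int.ofNat layer), filter - pvStarts.getD (layer - 1) 0)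

-- ===== PRECONDITION & SPEC =====
-- A raises ValueError("Invalid filter ID") exactly when filter ≥ 5696 (the total filter count); Pre_ excludes exactly those raising inputs
def Pre_size_conversion (filter : Int) : Prop := filter < 5696
instance (filter : Int) : Decidable (Pre_size_conversion filter) := by unfold Pre_size_conversion; infer_instance
def pvWitness_size_conversion : Int := 300

def Spec_size_conversion (filter : Int) (out : String × Int) : Prop := out = size_conversion_alt filter
instance (filter : Int) (out : String × Int) : Decidable (Spec_size_conversion filter out) := by unfold Spec_size_conversion; infer_instance

-- ===== CLAIM (what is proved, stated in full; the proofs are below) =====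
def Claim_equal_size_conversion : Prop := ∀ (filter : Int), Dom_size_conversion filter → Pre_size_conversion filter → Spec_size_conversion filter (size_conversion filter)

-- ===== LEMMAS AND PROOFS =====
theorem pvRange3 : PySem.List.pyRange 0 3 1 = [0, 1, 2] := by decide
theorem pvRange4 : PySem.List.pyRange 0 4 1 = [0, 1, 2, 3] := by decide
theorem pvRange8 : PySem.List.pyRange 0 8 1 = [0, 1, 2, 3, 4, 5, 6, 7] := by decide

-- one unfolding step of the bisect loop
theorem pvBisect_step (x : Int) (lo hi : Nat) (h : lo < hi) :
    pvBisect x lo hi =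
      if pvStarts.getD ((lo + hi) / 2) 0 ≤ x then pvBisect x ((lo + hi) / 2 + 1) hi
      else pvBisect x lo ((lo + hi) / 2) := by
  rw [pvBisect]; simp [h]

theorem pvBisect_stop (x : Int) (lo : Nat) : pvBisect x lo lo = lo := by
  rw [pvBisect]; simp

theorem pvAltv_0 (f : Int) (h2 : f < 0) :
    size_conversion_alt f = ("cnn_1", f) := by
  simp only [size_conversion_alt]
  rw [if_neg (by omega)]
  rw [pvBisect_step _ _ _ (by norm_num), if_neg (by simp [pvStarts]; omega)]
  rw [pvBisect_step _ _ _ (by norm_num), if_neg (by simp [pvStarts]; omega)]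
  rw [pvBisect_step _ _ _ (by norm_num), if_neg (by simp [pvStarts]; omega)]
  rw [pvBisect_step _ _ _ (by norm_num), if_neg (by simp [pvStarts]; omega)]
  rw [pvBisect_step _ _ _ (by norm_num), if_neg (by simp [pvStarts]; omega)]
  rw [pvBisect_stop]
  simp [pvStarts]
  decide

theorem pvAltv_1 (f : Int) (h1 : 0 ≤ f) (h2 : f < 64) :
    size_conversion_alt f = ("cnn_1", f) := by
  simp only [size_conversion_alt]
  rw [if_neg (by omega)]
  rw [pvBisect_step _ _ _ (by norm_num), if_neg (by simp [pvStarts]; omega)]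
  rw [pvBisect_step _ _ _ (by norm_num), if_neg (by simp [pvStarts]; omega)]
  rw [pvBisect_step _ _ _ (by norm_num), if_neg (by simp [pvStarts]; omega)]
  rw [pvBisect_step _ _ _ (by norm_num), if_neg (by simp [pvStarts]; omega)]
  rw [pvBisect_step _ _ _ (by norm_num), if_pos (by simp [pvStarts]; omega)]
  rw [pvBisect_stop]
  simp [pvStarts]
  decide

theorem pvAltv_2 (f : Int) (h1 : 64 ≤ f) (h2 : f < 128) :
    size_conversion_alt f = ("cnn_2", f - 64) := by
  simp only [size_conversion_alt]
  rw [if_neg (by omega)]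
  rw [pvBisect_step _ _ _ (by norm_num), if_neg (by simp [pvStarts]; omega)]
  rw [pvBisect_step _ _ _ (by norm_num), if_neg (by simp [pvStarts]; omega)]
  rw [pvBisect_step _ _ _ (by norm_num), if_neg (by simp [pvStarts]; omega)]
  rw [pvBisect_step _ _ _ (by norm_num), if_pos (by simp [pvStarts]; omega)]
  rw [pvBisect_stop]
  simp [pvStarts]
  decide

theorem pvAltv_3 (f : Int) (h1 : 128 ≤ f) (h2 : f < 192) :
    size_conversion_alt f = ("cnn_3", f - 128) := by
  simp only [size_conversion_alt]
  rw [if_neg (by omega)]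
  rw [pvBisect_step _ _ _ (by norm_num), if_neg (by simp [pvStarts]; omega)]
  rw [pvBisect_step _ _ _ (by norm_num), if_neg (by simp [pvStarts]; omega)]
  rw [pvBisect_step _ _ _ (by norm_num), if_pos (by simp [pvStarts]; omega)]
  rw [pvBisect_step _ _ _ (by norm_num), if_neg (by simp [pvStarts]; omega)]
  rw [pvBisect_stop]
  simp [pvStarts]
  decide

theorem pvAltv_4 (f : Int) (h1 : 192 ≤ f) (h2 : f < 320) :
    size_conversion_alt f = ("cnn_4", f - 192) := by
  simp only [size_conversion_alt]
  rw [if_neg (by omega)]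
  rw [pvBisect_step _ _ _ (by norm_num), if_neg (by simp [pvStarts]; omega)]
  rw [pvBisect_step _ _ _ (by norm_num), if_neg (by simp [pvStarts]; omega)]
  rw [pvBisect_step _ _ _ (by norm_num), if_pos (by simp [pvStarts]; omega)]
  rw [pvBisect_step _ _ _ (by norm_num), if_pos (by simp [pvStarts]; omega)]
  rw [pvBisect_stop]
  simp [pvStarts]
  decide

theorem pvAltv_5 (f : Int) (h1 : 320 ≤ f) (h2 : f < 448) :
    size_conversion_alt f = ("cnn_5", f - 320) := by
  simp only [size_conversion_alt]
  rw [if_neg (by omega)]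
  rw [pvBisect_step _ _ _ (by norm_num), if_neg (by simp [pvStarts]; omega)]
  rw [pvBisect_step _ _ _ (by norm_num), if_pos (by simp [pvStarts]; omega)]
  rw [pvBisect_step _ _ _ (by norm_num), if_neg (by simp [pvStarts]; omega)]
  rw [pvBisect_step _ _ _ (by norm_num), if_neg (by simp [pvStarts]; omega)]
  rw [pvBisect_step _ _ _ (by norm_num), if_neg (by simp [pvStarts]; omega)]
  rw [pvBisect_stop]
  simp [pvStarts]
  decide

theorem pvAltv_6 (f : Int) (h1 : 448 ≤ f) (h2 : f < 576) :
    size_conversion_alt f = ("cnn_6", f - 448) := by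
  simp only [size_conversion_alt]
  rw [if_neg (by omega)]
  rw [pvBisect_step _ _ _ (by norm_num), if_neg (by simp [pvStarts]; omega)]
  rw [pvBisect_step _ _ _ (by norm_num), if_pos (by simp [pvStarts]; omega)]
  rw [pvBisect_step _ _ _ (by norm_num), if_neg (by simp [pvStarts]; omega)]
  rw [pvBisect_step _ _ _ (by norm_num), if_neg (by simp [pvStarts]; omega)]
  rw [pvBisect_step _ _ _ (by norm_num), if_pos (by simp [pvStarts]; omega)]
  rw [pvBisect_stop]
  simp [pvStarts]
  decide

theorem pvAltv_7 (f : Int) (h1 : 576 ≤ f) (h2 : f < 832) :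
    size_conversion_alt f = ("cnn_7", f - 576) := by
  simp only [size_conversion_alt]
  rw [if_neg (by omega)]
  rw [pvBisect_step _ _ _ (by norm_num), if_neg (by simp [pvStarts]; omega)]
  rw [pvBisect_step _ _ _ (by norm_num), if_pos (by simp [pvStarts]; omega)]
  rw [pvBisect_step _ _ _ (by norm_num), if_neg (by simp [pvStarts]; omega)]
  rw [pvBisect_step _ _ _ (by norm_num), if_pos (by simp [pvStarts]; omega)]
  rw [pvBisect_stop]
  simp [pvStarts]
  decide

theorem pvAltv_8 (f : Int) (h1 : 832 ≤ f) (h2 : f < 1088) :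
    size_conversion_alt f = ("cnn_8", f - 832) := by
  simp only [size_conversion_alt]
  rw [if_neg (by omega)]
  rw [pvBisect_step _ _ _ (by norm_num), if_neg (by simp [pvStarts]; omega)]
  rw [pvBisect_step _ _ _ (by norm_num), if_pos (by simp [pvStarts]; omega)]
  rw [pvBisect_step _ _ _ (by norm_num), if_pos (by simp [pvStarts]; omega)]
  rw [pvBisect_step _ _ _ (by norm_num), if_neg (by simp [pvStarts]; omega)]
  rw [pvBisect_stop]
  simp [pvStarts]
  decide

theorem pvAltv_9 (f : Int) (h1 : 1088 ≤ f) (h2 : f < 1344) :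
    size_conversion_alt f = ("cnn_9", f - 1088) := by
  simp only [size_conversion_alt]
  rw [if_neg (by omega)]
  rw [pvBisect_step _ _ _ (by norm_num), if_neg (by simp [pvStarts]; omega)]
  rw [pvBisect_step _ _ _ (by norm_num), if_pos (by simp [pvStarts]; omega)]
  rw [pvBisect_step _ _ _ (by norm_num), if_pos (by simp [pvStarts]; omega)]
  rw [pvBisect_step _ _ _ (by norm_num), if_pos (by simp [pvStarts]; omega)]
  rw [pvBisect_stop]
  simp [pvStarts]
  decide

theorem pvAltv_10 (f : Int) (h1 : 1344 ≤ f) (h2 : f < 1600) :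
    size_conversion_alt f = ("cnn_10", f - 1344) := by
  simp only [size_conversion_alt]
  rw [if_neg (by omega)]
  rw [pvBisect_step _ _ _ (by norm_num), if_pos (by simp [pvStarts]; omega)]
  rw [pvBisect_step _ _ _ (by norm_num), if_neg (by simp [pvStarts]; omega)]
  rw [pvBisect_step _ _ _ (by norm_num), if_neg (by simp [pvStarts]; omega)]
  rw [pvBisect_step _ _ _ (by norm_num), if_neg (by simp [pvStarts]; omega)]
  rw [pvBisect_step _ _ _ (by norm_num), if_neg (by simp [pvStarts]; omega)]
  rw [pvBisect_stop]
  simp [pvStarts]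
  decide

theorem pvAltv_11 (f : Int) (h1 : 1600 ≤ f) (h2 : f < 2112) :
    size_conversion_alt f = ("cnn_11", f - 1600) := by
  simp only [size_conversion_alt]
  rw [if_neg (by omega)]
  rw [pvBisect_step _ _ _ (by norm_num), if_pos (by simp [pvStarts]; omega)]
  rw [pvBisect_step _ _ _ (by norm_num), if_neg (by simp [pvStarts]; omega)]
  rw [pvBisect_step _ _ _ (by norm_num), if_neg (by simp [pvStarts]; omega)]
  rw [pvBisect_step _ _ _ (by norm_num), if_neg (by simp [pvStarts]; omega)]
  rw [pvBisect_step _ _ _ (by norm_num), if_pos (by simp [pvStarts]; omega)]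
  rw [pvBisect_stop]
  simp [pvStarts]
  decide

theorem pvAltv_12 (f : Int) (h1 : 2112 ≤ f) (h2 : f < 2624) :
    size_conversion_alt f = ("cnn_12", f - 2112) := by
  simp only [size_conversion_alt]
  rw [if_neg (by omega)]
  rw [pvBisect_step _ _ _ (by norm_num), if_pos (by simp [pvStarts]; omega)]
  rw [pvBisect_step _ _ _ (by norm_num), if_neg (by simp [pvStarts]; omega)]
  rw [pvBisect_step _ _ _ (by norm_num), if_neg (by simp [pvStarts]; omega)]
  rw [pvBisect_step _ _ _ (by norm_num), if_pos (by simp [pvStarts]; omega)]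
  rw [pvBisect_stop]
  simp [pvStarts]
  decide

theorem pvAltv_13 (f : Int) (h1 : 2624 ≤ f) (h2 : f < 3136) :
    size_conversion_alt f = ("cnn_13", f - 2624) := by
  simp only [size_conversion_alt]
  rw [if_neg (by omega)]
  rw [pvBisect_step _ _ _ (by norm_num), if_pos (by simp [pvStarts]; omega)]
  rw [pvBisect_step _ _ _ (by norm_num), if_neg (by simp [pvStarts]; omega)]
  rw [pvBisect_step _ _ _ (by norm_num), if_pos (by simp [pvStarts]; omega)]
  rw [pvBisect_step _ _ _ (by norm_num), if_neg (by simp [pvStarts]; omega)]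
  rw [pvBisect_stop]
  simp [pvStarts]
  decide

theorem pvAltv_14 (f : Int) (h1 : 3136 ≤ f) (h2 : f < 3648) :
    size_conversion_alt f = ("cnn_14", f - 3136) := by
  simp only [size_conversion_alt]
  rw [if_neg (by omega)]
  rw [pvBisect_step _ _ _ (by norm_num), if_pos (by simp [pvStarts]; omega)]
  rw [pvBisect_step _ _ _ (by norm_num), if_neg (by simp [pvStarts]; omega)]
  rw [pvBisect_step _ _ _ (by norm_num), if_pos (by simp [pvStarts]; omega)]
  rw [pvBisect_step _ _ _ (by norm_num), if_pos (by simp [pvStarts]; omega)]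
  rw [pvBisect_stop]
  simp [pvStarts]
  decide

theorem pvAltv_15 (f : Int) (h1 : 3648 ≤ f) (h2 : f < 4160) :
    size_conversion_alt f = ("cnn_15", f - 3648) := by
  simp only [size_conversion_alt]
  rw [if_neg (by omega)]
  rw [pvBisect_step _ _ _ (by norm_num), if_pos (by simp [pvStarts]; omega)]
  rw [pvBisect_step _ _ _ (by norm_num), if_pos (by simp [pvStarts]; omega)]
  rw [pvBisect_step _ _ _ (by norm_num), if_neg (by simp [pvStarts]; omega)]
  rw [pvBisect_step _ _ _ (by norm_num), if_neg (by simp [pvStarts]; omega)]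
  rw [pvBisect_stop]
  simp [pvStarts]
  decide

theorem pvAltv_16 (f : Int) (h1 : 4160 ≤ f) (h2 : f < 4672) :
    size_conversion_alt f = ("cnn_16", f - 4160) := by
  simp only [size_conversion_alt]
  rw [if_neg (by omega)]
  rw [pvBisect_step _ _ _ (by norm_num), if_pos (by simp [pvStarts]; omega)]
  rw [pvBisect_step _ _ _ (by norm_num), if_pos (by simp [pvStarts]; omega)]
  rw [pvBisect_step _ _ _ (by norm_num), if_neg (by simp [pvStarts]; omega)]
  rw [pvBisect_step _ _ _ (by norm_num), if_pos (by simp [pvStarts]; omega)]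
  rw [pvBisect_stop]
  simp [pvStarts]
  decide

theorem pvAltv_17 (f : Int) (h1 : 4672 ≤ f) (h2 : f < 5184) :
    size_conversion_alt f = ("cnn_17", f - 4672) := by
  simp only [size_conversion_alt]
  rw [if_neg (by omega)]
  rw [pvBisect_step _ _ _ (by norm_num), if_pos (by simp [pvStarts]; omega)]
  rw [pvBisect_step _ _ _ (by norm_num), if_pos (by simp [pvStarts]; omega)]
  rw [pvBisect_step _ _ _ (by norm_num), if_pos (by simp [pvStarts]; omega)]
  rw [pvBisect_step _ _ _ (by norm_num), if_neg (by simp [pvStarts]; omega)]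
  rw [pvBisect_stop]
  simp [pvStarts]
  decide

theorem pvAltv_18 (f : Int) (h1 : 5184 ≤ f) (h2 : f < 5696) :
    size_conversion_alt f = ("cnn_18", f - 5184) := by
  simp only [size_conversion_alt]
  rw [if_neg (by omega)]
  rw [pvBisect_step _ _ _ (by norm_num), if_pos (by simp [pvStarts]; omega)]
  rw [pvBisect_step _ _ _ (by norm_num), if_pos (by simp [pvStarts]; omega)]
  rw [pvBisect_step _ _ _ (by norm_num), if_pos (by simp [pvStarts]; omega)]
  rw [pvBisect_step _ _ _ (by norm_num), if_pos (by simp [pvStarts]; omega)]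
  rw [pvBisect_stop]
  simp [pvStarts]
  decide

theorem pvCase_0 (f : Int) (h2 : f < 0) :
    size_conversion f = size_conversion_alt f := by
  rw [pvAltv_0 f h2]
  simp only [size_conversion, pvRange3, pvRange4, pvRange8, pvLoopA]
  rw [if_pos (by omega)]
  simp only []
  rfl

theorem pvCase_1 (f : Int) (h1 : 0 ≤ f) (h2 : f < 64) :
    size_conversion f = size_conversion_alt f := by
  rw [pvAltv_1 f h1 h2]
  simp only [size_conversion, pvRange3, pvRange4, pvRange8, pvLoopA]
  rw [if_pos (by omega)]
  simp only []
  rfl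

theorem pvCase_2 (f : Int) (h1 : 64 ≤ f) (h2 : f < 128) :
    size_conversion f = size_conversion_alt f := by
  rw [pvAltv_2 f h1 h2]
  simp only [size_conversion, pvRange3, pvRange4, pvRange8, pvLoopA]
  rw [if_neg (by omega), if_pos (by omega)]
  simp only []
  rfl

theorem pvCase_3 (f : Int) (h1 : 128 ≤ f) (h2 : f < 192) :
    size_conversion f = size_conversion_alt f := by
  rw [pvAltv_3 f h1 h2]
  simp only [size_conversion, pvRange3, pvRange4, pvRange8, pvLoopA]
  rw [if_neg (by omega), if_neg (by omega), if_pos (by omega)]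
  simp only []
  refine Prod.ext_iff.mpr ⟨rfl, ?_⟩
  show f - 64 - 64 = f - 128
  omega

theorem pvCase_4 (f : Int) (h1 : 192 ≤ f) (h2 : f < 320) :
    size_conversion f = size_conversion_alt f := by
  rw [pvAltv_4 f h1 h2]
  simp only [size_conversion, pvRange3, pvRange4, pvRange8, pvLoopA]
  rw [if_neg (by omega), if_neg (by omega), if_neg (by omega)]
  simp only []
  rw [if_pos (by omega)]
  simp only []
  refine Prod.ext_iff.mpr ⟨rfl, ?_⟩
  show f - 64 - 64 - 64 = f - 192
  omega

theorem pvCase_5 (f : Int) (h1 : 320 ≤ f) (h2 : f < 448) :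
    size_conversion f = size_conversion_alt f := by
  rw [pvAltv_5 f h1 h2]
  simp only [size_conversion, pvRange3, pvRange4, pvRange8, pvLoopA]
  rw [if_neg (by omega), if_neg (by omega), if_neg (by omega)]
  simp only []
  rw [if_neg (by omega), if_pos (by omega)]
  simp only []
  refine Prod.ext_iff.mpr ⟨rfl, ?_⟩
  show f - 64 - 64 - 64 - 128 = f - 320
  omega

theorem pvCase_6 (f : Int) (h1 : 448 ≤ f) (h2 : f < 576) :
    size_conversion f = size_conversion_alt f := by
  rw [pvAltv_6 f h1 h2]
  simp only [size_conversion, pvRange3, pvRange4, pvRange8, pvLoopA]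
  rw [if_neg (by omega), if_neg (by omega), if_neg (by omega)]
  simp only []
  rw [if_neg (by omega), if_neg (by omega), if_pos (by omega)]
  simp only []
  refine Prod.ext_iff.mpr ⟨rfl, ?_⟩
  show f - 64 - 64 - 64 - 128 - 128 = f - 448
  omega

theorem pvCase_7 (f : Int) (h1 : 576 ≤ f) (h2 : f < 832) :
    size_conversion f = size_conversion_alt f := by
  rw [pvAltv_7 f h1 h2]
  simp only [size_conversion, pvRange3, pvRange4, pvRange8, pvLoopA]
  rw [if_neg (by omega), if_neg (by omega), if_neg (by omega)]
  simp only []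
  rw [if_neg (by omega), if_neg (by omega), if_neg (by omega)]
  simp only []
  rw [if_pos (by omega)]
  simp only []
  refine Prod.ext_iff.mpr ⟨rfl, ?_⟩
  show f - 64 - 64 - 64 - 128 - 128 - 128 = f - 576
  omega

theorem pvCase_8 (f : Int) (h1 : 832 ≤ f) (h2 : f < 1088) :
    size_conversion f = size_conversion_alt f := by
  rw [pvAltv_8 f h1 h2]
  simp only [size_conversion, pvRange3, pvRange4, pvRange8, pvLoopA]
  rw [if_neg (by omega), if_neg (by omega), if_neg (by omega)]
  simp only []
  rw [if_neg (by omega), if_neg (by omega), if_neg (by omega)]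
  simp only []
  rw [if_neg (by omega), if_pos (by omega)]
  simp only []
  refine Prod.ext_iff.mpr ⟨rfl, ?_⟩
  show f - 64 - 64 - 64 - 128 - 128 - 128 - 256 = f - 832
  omega

theorem pvCase_9 (f : Int) (h1 : 1088 ≤ f) (h2 : f < 1344) :
    size_conversion f = size_conversion_alt f := by
  rw [pvAltv_9 f h1 h2]
  simp only [size_conversion, pvRange3, pvRange4, pvRange8, pvLoopA]
  rw [if_neg (by omega), if_neg (by omega), if_neg (by omega)]
  simp only []
  rw [if_neg (by omega), if_neg (by omega), if_neg (by omega)]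
  simp only []
  rw [if_neg (by omega), if_neg (by omega), if_pos (by omega)]
  simp only []
  refine Prod.ext_iff.mpr ⟨rfl, ?_⟩
  show f - 64 - 64 - 64 - 128 - 128 - 128 - 256 - 256 = f - 1088
  omega

theorem pvCase_10 (f : Int) (h1 : 1344 ≤ f) (h2 : f < 1600) :
    size_conversion f = size_conversion_alt f := by
  rw [pvAltv_10 f h1 h2]
  simp only [size_conversion, pvRange3, pvRange4, pvRange8, pvLoopA]
  rw [if_neg (by omega), if_neg (by omega), if_neg (by omega)]
  simp only []
  rw [if_neg (by omega), if_neg (by omega), if_neg (by omega)]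
  simp only []
  rw [if_neg (by omega), if_neg (by omega), if_neg (by omega), if_pos (by omega)]
  simp only []
  refine Prod.ext_iff.mpr ⟨rfl, ?_⟩
  show f - 64 - 64 - 64 - 128 - 128 - 128 - 256 - 256 - 256 = f - 1344
  omega

theorem pvCase_11 (f : Int) (h1 : 1600 ≤ f) (h2 : f < 2112) :
    size_conversion f = size_conversion_alt f := by
  rw [pvAltv_11 f h1 h2]
  simp only [size_conversion, pvRange3, pvRange4, pvRange8, pvLoopA]
  rw [if_neg (by omega), if_neg (by omega), if_neg (by omega)]
  simp only []
  rw [if_neg (by omega), if_neg (by omega), if_neg (by omega)]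
  simp only []
  rw [if_neg (by omega), if_neg (by omega), if_neg (by omega), if_neg (by omega)]
  simp only []
  rw [if_pos (by omega)]
  simp only []
  refine Prod.ext_iff.mpr ⟨rfl, ?_⟩
  show f - 64 - 64 - 64 - 128 - 128 - 128 - 256 - 256 - 256 - 256 = f - 1600
  omega

theorem pvCase_12 (f : Int) (h1 : 2112 ≤ f) (h2 : f < 2624) :
    size_conversion f = size_conversion_alt f := by
  rw [pvAltv_12 f h1 h2]
  simp only [size_conversion, pvRange3, pvRange4, pvRange8, pvLoopA]
  rw [if_neg (by omega), if_neg (by omega), if_neg (by omega)]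
  simp only []
  rw [if_neg (by omega), if_neg (by omega), if_neg (by omega)]
  simp only []
  rw [if_neg (by omega), if_neg (by omega), if_neg (by omega), if_neg (by omega)]
  simp only []
  rw [if_neg (by omega), if_pos (by omega)]
  simp only []
  refine Prod.ext_iff.mpr ⟨rfl, ?_⟩
  show f - 64 - 64 - 64 - 128 - 128 - 128 - 256 - 256 - 256 - 256 - 512 = f - 2112
  omega

theorem pvCase_13 (f : Int) (h1 : 2624 ≤ f) (h2 : f < 3136) :
    size_conversion f = size_conversion_alt f := by
  rw [pvAltv_13 f h1 h2]
  simp only [size_conversion, pvRange3, pvRange4, pvRange8, pvLoopA]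
  rw [if_neg (by omega), if_neg (by omega), if_neg (by omega)]
  simp only []
  rw [if_neg (by omega), if_neg (by omega), if_neg (by omega)]
  simp only []
  rw [if_neg (by omega), if_neg (by omega), if_neg (by omega), if_neg (by omega)]
  simp only []
  rw [if_neg (by omega), if_neg (by omega), if_pos (by omega)]
  simp only []
  refine Prod.ext_iff.mpr ⟨rfl, ?_⟩
  show f - 64 - 64 - 64 - 128 - 128 - 128 - 256 - 256 - 256 - 256 - 512 - 512 = f - 2624
  omega

theorem pvCase_14 (f : Int) (h1 : 3136 ≤ f) (h2 : f < 3648) :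
    size_conversion f = size_conversion_alt f := by
  rw [pvAltv_14 f h1 h2]
  simp only [size_conversion, pvRange3, pvRange4, pvRange8, pvLoopA]
  rw [if_neg (by omega), if_neg (by omega), if_neg (by omega)]
  simp only []
  rw [if_neg (by omega), if_neg (by omega), if_neg (by omega)]
  simp only []
  rw [if_neg (by omega), if_neg (by omega), if_neg (by omega), if_neg (by omega)]
  simp only []
  rw [if_neg (by omega), if_neg (by omega), if_neg (by omega), if_pos (by omega)]
  simp only []
  refine Prod.ext_iff.mpr ⟨rfl, ?_⟩
  show f - 64 - 64 - 64 - 128 - 128 - 128 - 256 - 256 - 256 - 256 - 512 - 512 - 512 = f - 3136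
  omega

theorem pvCase_15 (f : Int) (h1 : 3648 ≤ f) (h2 : f < 4160) :
    size_conversion f = size_conversion_alt f := by
  rw [pvAltv_15 f h1 h2]
  simp only [size_conversion, pvRange3, pvRange4, pvRange8, pvLoopA]
  rw [if_neg (by omega), if_neg (by omega), if_neg (by omega)]
  simp only []
  rw [if_neg (by omega), if_neg (by omega), if_neg (by omega)]
  simp only []
  rw [if_neg (by omega), if_neg (by omega), if_neg (by omega), if_neg (by omega)]
  simp only []
  rw [if_neg (by omega), if_neg (by omega), if_neg (by omega), if_neg (by omega), if_pos (by omega)]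
  simp only []
  refine Prod.ext_iff.mpr ⟨rfl, ?_⟩
  show f - 64 - 64 - 64 - 128 - 128 - 128 - 256 - 256 - 256 - 256 - 512 - 512 - 512 - 512 = f - 3648
  omega

theorem pvCase_16 (f : Int) (h1 : 4160 ≤ f) (h2 : f < 4672) :
    size_conversion f = size_conversion_alt f := by
  rw [pvAltv_16 f h1 h2]
  simp only [size_conversion, pvRange3, pvRange4, pvRange8, pvLoopA]
  rw [if_neg (by omega), if_neg (by omega), if_neg (by omega)]
  simp only []
  rw [if_neg (by omega), if_neg (by omega), if_neg (by omega)]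
  simp only []
  rw [if_neg (by omega), if_neg (by omega), if_neg (by omega), if_neg (by omega)]
  simp only []
  rw [if_neg (by omega), if_neg (by omega), if_neg (by omega), if_neg (by omega), if_neg (by omega), if_pos (by omega)]
  simp only []
  refine Prod.ext_iff.mpr ⟨rfl, ?_⟩
  show f - 64 - 64 - 64 - 128 - 128 - 128 - 256 - 256 - 256 - 256 - 512 - 512 - 512 - 512 - 512 = f - 4160
  omega

theorem pvCase_17 (f : Int) (h1 : 4672 ≤ f) (h2 : f < 5184) :
    size_conversion f = size_conversion_alt f := by
  rw [pvAltv_17 f h1 h2]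
  simp only [size_conversion, pvRange3, pvRange4, pvRange8, pvLoopA]
  rw [if_neg (by omega), if_neg (by omega), if_neg (by omega)]
  simp only []
  rw [if_neg (by omega), if_neg (by omega), if_neg (by omega)]
  simp only []
  rw [if_neg (by omega), if_neg (by omega), if_neg (by omega), if_neg (by omega)]
  simp only []
  rw [if_neg (by omega), if_neg (by omega), if_neg (by omega), if_neg (by omega), if_neg (by omega), if_neg (by omega), if_pos (by omega)]
  simp only []
  refine Prod.ext_iff.mpr ⟨rfl, ?_⟩
  show f - 64 - 64 - 64 - 128 - 128 - 128 - 256 - 256 - 256 - 256 - 512 - 512 - 512 - 512 - 512 - 512 = f - 4672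
  omega

theorem pvCase_18 (f : Int) (h1 : 5184 ≤ f) (h2 : f < 5696) :
    size_conversion f = size_conversion_alt f := by
  rw [pvAltv_18 f h1 h2]
  simp only [size_conversion, pvRange3, pvRange4, pvRange8, pvLoopA]
  rw [if_neg (by omega), if_neg (by omega), if_neg (by omega)]
  simp only []
  rw [if_neg (by omega), if_neg (by omega), if_neg (by omega)]
  simp only []
  rw [if_neg (by omega), if_neg (by omega), if_neg (by omega), if_neg (by omega)]
  simp only []
  rw [if_neg (by omega), if_neg (by omega), if_neg (by omega), if_neg (by omega), if_neg (by omega), if_neg (by omega), if_neg (by omega), if_pos (by omega)]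
  simp only []
  refine Prod.ext_iff.mpr ⟨rfl, ?_⟩
  show f - 64 - 64 - 64 - 128 - 128 - 128 - 256 - 256 - 256 - 256 - 512 - 512 - 512 - 512 - 512 - 512 - 512 = f - 5184
  omega

-- ===== VERDICT (by name: the statement is the Claim_ definition above) =====
set_option maxHeartbeats 2000000 in
theorem size_conversion_spec : Claim_equal_size_conversion := by
  intro f _ hpre
  unfold Pre_size_conversion at hpre
  unfold Spec_size_conversion
  rcases (show f < 0 ∨ (0 ≤ f ∧ f < 64) ∨ (64 ≤ f ∧ f < 128) ∨ (128 ≤ f ∧ f < 192) ∨ (192 ≤ f ∧ f < 320) ∨ (320 ≤ f ∧ f < 448) ∨ (448 ≤ f ∧ f < 576) ∨ (576 ≤ f ∧ f < 832) ∨ (832 ≤ f ∧ f < 1088) ∨ (1088 ≤ f ∧ f < 1344) ∨ (1344 ≤ f ∧ f < 1600) ∨ (1600 ≤ f ∧ f < 2112) ∨ (2112 ≤ f ∧ f < 2624) ∨ (2624 ≤ f ∧ f < 3136) ∨ (3136 ≤ f ∧ f < 3648) ∨ (3648 ≤ f ∧ f < 4160) ∨ (4160 ≤ f ∧ f < 4672)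 ∨ (4672 ≤ f ∧ f < 5184) ∨ (5184 ≤ f ∧ f < 5696) from by omega) with h|h|h|h|h|h|h|h|h|h|h|h|h|h|h|h|h|h|h
  · exact pvCase_0 f h
  · exact pvCase_1 f h.1 h.2
  · exact pvCase_2 f h.1 h.2
  · exact pvCase_3 f h.1 h.2
  · exact pvCase_4 f h.1 h.2
  · exact pvCase_5 f h.1 h.2
  · exact pvCase_6 f h.1 h.2
  · exact pvCase_7 f h.1 h.2
  · exact pvCase_8 f h.1 h.2
  · exact pvCase_9 f h.1 h.2
  · exact pvCase_10 f h.1 h.2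
  · exact pvCase_11 f h.1 h.2
  · exact pvCase_12 f h.1 h.2
  · exact pvCase_13 f h.1 h.2
  · exact pvCase_14 f h.1 h.2
  · exact pvCase_15 f h.1 h.2
  · exact pvCase_16 f h.1 h.2
  · exact pvCase_17 f h.1 h.2
  · exact pvCase_18 f h.1 h.2
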